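-- pv_equiv track=rewrite | github.com/Lohomi/50-Days-of-Code | 16-May.py | minmaxdigit
-- ===== SOURCE A (Python) =====
-- def minmaxdigit(n):               # Finds the minimum and maximum digits of a number
--     digit = list()
--     while (n!=0):
--         digit.append(n%10)
--         n = n//10
--     digit.sort()
--     x=len(digit)
--     return digit[0],digit[x-1]
-- ===== SOURCE B (Python) =====
-- def minmaxdigit(n):               # Finds the minimum and maximum digits of a number
--     digit = []
--     while n != 0:
--         digit.append(n % 10)
--         n = n // 10
--     lo = hi = digit[0]
--     for d in digit[1:]:
--         if d < lo:
--             lo = d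
--         if d > hi:
--             hi = d
--     return lo, hi
-- ===== Notes on version B (the rewrite author's own statement) =====
-- stated objective: alternative
-- what changed: Replaces sorting the digit list and indexing its ends with a single linear scan that tracks the running minimum and maximum.
-- outside the precondition, e.g. on minmaxdigit(0): A raises IndexError, B raises IndexError
import Mathlib
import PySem

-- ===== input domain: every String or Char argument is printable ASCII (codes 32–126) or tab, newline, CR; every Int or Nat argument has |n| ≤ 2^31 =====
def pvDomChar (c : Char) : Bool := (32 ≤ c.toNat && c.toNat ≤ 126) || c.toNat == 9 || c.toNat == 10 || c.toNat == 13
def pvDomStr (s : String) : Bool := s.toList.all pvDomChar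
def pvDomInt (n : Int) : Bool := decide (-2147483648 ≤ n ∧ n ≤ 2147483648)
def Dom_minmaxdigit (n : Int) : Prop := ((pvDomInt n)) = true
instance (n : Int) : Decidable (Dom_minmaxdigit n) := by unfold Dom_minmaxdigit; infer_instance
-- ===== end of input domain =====

-- B replaces sorting the digit list with a single running min/max scan (same digit-extraction loop).


-- ===== PORT A =====
-- the 'while n != 0' digit-extraction loop of both Pythons; fuel (n.natAbs + 1) only
-- makes the recursion total — for 0 < n the loop stops on n = 0 well before the fuel runs out
def pvDigits : Nat → Int → List Int → List Int
  | 0, _, acc => acc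
  | f + 1, n, acc =>
      if n ≠ 0 then pvDigits f (PySem.Int.floordiv n 10) (acc ++ [PySem.Int.mod n 10]) else acc

def minmaxdigit (n : Int) : Int × Int :=
  let digit := pvDigits (n.natAbs + 1) n []
  let digit := PySem.List.sorted digit (fun x => x) false
  let x : Int := digit.length
  ((PySem.List.pyGet? digit 0).getD 0, (PySem.List.pyGet? digit (x - 1)).getD 0)
  -- .getD 0 is never reached inside Pre_ (digit ≠ []); Python raises IndexError exactly outside Pre_

-- ===== PORT B =====
def minmaxdigit_alt (n : Int) : Int × Int :=
  let digit := pvDigits (n.natAbs + 1) n []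
  match digit with
  | [] => (0, 0)   -- digit[0] raises IndexError in Python here; outside Pre_
  | h :: t =>
      t.foldl (fun p d => (if d < p.1 then d else p.1, if d > p.2 then d else p.2)) (h, h)

-- ===== PRECONDITION & SPEC =====
-- Pre_ admits exactly the inputs where Python A returns: for n = 0 the digit list is empty and
-- digit[0] raises IndexError; for n < 0 the while-loop never terminates (n // 10 stalls at -1).
def Pre_minmaxdigit (n : Int) : Prop := 0 < n
instance (n : Int) : Decidable (Pre_minmaxdigit n) := by unfold Pre_minmaxdigit; infer_instance
def pvWitness_minmaxdigit : Int := 502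

def Spec_minmaxdigit (n : Int) (out : Int × Int) : Prop := out = minmaxdigit_alt n
instance (n : Int) (out : Int × Int) : Decidable (Spec_minmaxdigit n out) := by unfold Spec_minmaxdigit; infer_instance

-- ===== CLAIM (what is proved, stated in full; the proofs are below) =====
def Claim_equal_minmaxdigit : Prop := ∀ (n : Int), Dom_minmaxdigit n → Pre_minmaxdigit n → Spec_minmaxdigit n (minmaxdigit n)

-- ===== LEMMAS AND PROOFS =====

-- nonemptiness of the extracted digit list
theorem pvDigits_ne_nil_of_acc (f : Nat) (n : Int) (acc : List Int) (h : acc ≠ []) :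
    pvDigits f n acc ≠ [] := by
  induction f generalizing n acc with
  | zero => exact h
  | succ f ih =>
      simp only [pvDigits]
      split
      · exact ih _ _ (by simp)
      · exact h

theorem pvDigits_ne_nil (f : Nat) (n : Int) (hn : n ≠ 0) :
    pvDigits (f + 1) n [] ≠ [] := by
  simp only [pvDigits, if_pos hn]
  exact pvDigits_ne_nil_of_acc _ _ _ (by simp)

-- the pair fold splits into a min-fold and a max-fold
theorem foldl_pair_minmax (t : List Int) (a b : Int) :
    t.foldl (fun p d => (if d < p.1 then d else p.1, if d > p.2 then d else p.2)) (a, b)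
      = (t.foldl min a, t.foldl max b) := by
  induction t generalizing a b with
  | nil => rfl
  | cons x t ih =>
      simp only [List.foldl_cons, ih]
      have h1 : (if x < a then x else a) = min a x := by rw [min_def]; split_ifs <;> omega
      have h2 : (if x > b then x else b) = max b x := by rw [max_def]; split_ifs <;> omega
      rw [h1, h2]

-- head of the sorted list = running minimum
theorem sorted_head_eq_foldl_min (h : Int) (t : List Int) (m : Int) (rest : List Int)
    (hs : PySem.List.sorted (h :: t) (fun x => x) false = m :: rest) :
    m = t.foldl min h := by
  have hmin : PySem.List.min? (h :: t) (fun x => x) = some (t.foldl min h) :=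
    PySem.List.min?_id_cons h t
  have hmem : t.foldl min h ∈ h :: t := PySem.List.min?_mem hmin
  have hle : ∀ y ∈ (h :: t), t.foldl min h ≤ y := PySem.List.min?_isMin hmin
  have hmmem : m ∈ h :: t := by
    have := PySem.List.sorted_perm (h :: t) (fun x => x) false
    rw [hs] at this
    exact this.mem_iff.mp (by simp)
  have h1 : m ≤ t.foldl min h := PySem.List.key_head_sorted_le _ _ hs _ hmem
  exact le_antisymm h1 (hle _ hmmem)

-- last of the sorted list = running maximum
theorem sorted_last_eq_foldl_max (h : Int) (t : List Int) :
    (PySem.List.sorted (h :: t) (fun x => x) false).getLast? = some (t.foldl max h) := by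
  have hmax : PySem.List.max? (h :: t) (fun x => x) = some (t.foldl max h) :=
    PySem.List.max?_id_cons h t
  have hmem : t.foldl max h ∈ h :: t := PySem.List.max?_mem hmax
  have hge : ∀ y ∈ (h :: t), y ≤ t.foldl max h := PySem.List.max?_isMax hmax
  set s := PySem.List.sorted (h :: t) (fun x => x) false with hsdef
  have hperm : s.Perm (h :: t) := PySem.List.sorted_perm _ _ _
  have hne : s ≠ [] := by
    intro h0
    have := hperm.length_eq
    simp [h0] at this
  have hlenpos : 0 < s.length := List.length_pos_iff.mpr hne
  have hlast : s.getLast? = some (s[s.length - 1]) := by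
    rw [List.getLast?_eq_getElem?, List.getElem?_eq_getElem (by omega)]
  rw [hlast]
  congr 1
  have hlmem : s[s.length - 1] ∈ h :: t := hperm.mem_iff.mp (List.getElem_mem _)
  have hfold_mem_s : t.foldl max h ∈ s := hperm.mem_iff.mpr hmem
  obtain ⟨p, hp, hpe⟩ := List.getElem_of_mem hfold_mem_s
  have hmono : s[p] ≤ s[s.length - 1] := by
    have hq : s.length - 1 < (PySem.List.sorted (h :: t) (fun x => x)).length := by
      have hx : (PySem.List.sorted (h :: t) (fun x => x)).length = s.length := by rw [hsdef]
      omega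
    have := PySem.List.key_sorted_getElem_mono (h :: t) (fun x => x)
      (p := p) (q := s.length - 1) (by omega) hq
    simpa [← hsdef] using this
  rw [hpe] at hmono
  exact le_antisymm (hge _ hlmem) hmono

-- ===== VERDICT (by name: the statement is the Claim_ definition above) =====
theorem minmaxdigit_spec : Claim_equal_minmaxdigit := by
  intro n _ hpre
  have hpos : 0 < n := hpre
  unfold Spec_minmaxdigit minmaxdigit minmaxdigit_alt
  have hne : pvDigits (n.natAbs + 1) n [] ≠ [] := by
    cases hf : n.natAbs + 1 with
    | zero => omega
    | succ f => exact pvDigits_ne_nil f n (by omega)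
  rcases hd : pvDigits (n.natAbs + 1) n [] with _ | ⟨h, t⟩
  · exact absurd hd hne
  simp only [foldl_pair_minmax]
  rcases hs : PySem.List.sorted (h :: t) (fun x => x) false with _ | ⟨m, rest⟩
  · exact absurd ((PySem.List.sorted_eq_nil_iff _ _ _).mp hs) (by simp)
  have hhead := sorted_head_eq_foldl_min h t m rest hs
  have hlast := sorted_last_eq_foldl_max h t
  rw [hs] at hlast
  have hlen : ((m :: rest).length : Int) - 1 = ((rest.length : Nat) : Int) := by
    simp
  rw [hlen]
  rw [PySem.List.pyGet?_zero_cons, PySem.List.pyGet?_natCast]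
  rw [show (m :: rest)[(rest.length : Nat)]? = (m :: rest).getLast? by
    rw [List.getLast?_eq_getElem?]; simp]
  rw [hlast]
  simp [hhead]
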